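-- pv_equiv track=rewrite | github.com/DongShan03/LTFC_251117 | utils/get_ID.py | collect_fieldnames
-- ===== SOURCE A (Python) =====
-- from typing import Any, Dict, Iterable, List, Set, Tuple
--
-- Record = Dict[str, Any]
--
-- PREFERRED_FIELD_ORDER = [
--     "Id",
--     "name",
--     "py",
--     "age",
--     "alias",
--     "lifeTime",
--     "startAge",
--     "endAge",
--     "homeTown",
--     "houseName",
--     "country",
--     "worksCount",
--     "desc",
--     "content",
--     "tags",
--     "category",
--     "searchAlias",
--     "modelOrigin",
--     "avatar",
--     "representSnapUrl",
--     "representThumbTileUrl",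
--     "representRes",
--     "otherAvatars",
--     "spelling",
--     "auditState",
--     "auditMessage",
--     "deleted",
--     "ctime",
--     "utime",
-- ]
--
-- def collect_fieldnames(records: Iterable[Record]) -> List[str]:
--     """根据优先顺序生成 CSV 列名列表。"""
--     key_set = {key for record in records for key in record.keys()}
--     fieldnames: List[str] = []
--
--     for field in PREFERRED_FIELD_ORDER:
--         if field in key_set:
--             fieldnames.append(field)
--             key_set.remove(field)
--
--     fieldnames.extend(sorted(key_set))
--     return fieldnames
-- ===== SOURCE B (Python) =====
-- from typing import Any, Dict, Iterable, List
--
-- Record = Dict[str, Any]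
--
-- PREFERRED_FIELD_ORDER = [
--     "Id", "name", "py", "age", "alias", "lifeTime", "startAge", "endAge",
--     "homeTown", "houseName", "country", "worksCount", "desc", "content",
--     "tags", "category", "searchAlias", "modelOrigin", "avatar",
--     "representSnapUrl", "representThumbTileUrl", "representRes",
--     "otherAvatars", "spelling", "auditState", "auditMessage", "deleted",
--     "ctime", "utime",
-- ]
--
-- def collect_fieldnames(records: Iterable[Record]) -> List[str]:
--     """根据优先顺序生成 CSV 列名列表。"""
--     keys = {key for record in records for key in record.keys()}
--     index = {field: i for i, field in enumerate(PREFERRED_FIELD_ORDER)}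
--     preferred: List[str] = []
--     others: List[str] = []
--     for key in keys:
--         (preferred if key in index else others).append(key)
--     preferred.sort(key=lambda k: index[k])
--     others.sort()
--     return preferred + others
-- ===== Notes on version B (the rewrite author's own statement) =====
-- stated objective: alternative
-- what changed: Instead of iterating the fixed preferred list with a membership test and set removal, B builds a field->position index map, partitions the key set in one pass into preferred/other buckets, sorts the preferred bucket by index position and the rest alphabetically.
import Mathlib
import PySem

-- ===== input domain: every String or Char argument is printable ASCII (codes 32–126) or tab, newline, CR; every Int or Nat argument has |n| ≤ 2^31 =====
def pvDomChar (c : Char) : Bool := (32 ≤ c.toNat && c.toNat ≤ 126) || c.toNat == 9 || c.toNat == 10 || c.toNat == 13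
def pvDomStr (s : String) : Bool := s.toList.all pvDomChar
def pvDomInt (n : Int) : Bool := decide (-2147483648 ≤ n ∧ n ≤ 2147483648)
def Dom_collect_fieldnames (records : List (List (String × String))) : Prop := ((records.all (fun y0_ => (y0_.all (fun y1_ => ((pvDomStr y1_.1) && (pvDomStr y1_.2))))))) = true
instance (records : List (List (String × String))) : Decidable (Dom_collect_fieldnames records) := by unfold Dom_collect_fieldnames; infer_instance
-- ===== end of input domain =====

-- B replaces A's loop over PREFERRED_FIELD_ORDER (membership test + set removal) by one partition
-- pass over the key set with an index map, sorting the preferred bucket by index; objective: alternative.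

def PREFERRED_FIELD_ORDER : List String :=
  ["Id", "name", "py", "age", "alias", "lifeTime", "startAge", "endAge",
   "homeTown", "houseName", "country", "worksCount", "desc", "content",
   "tags", "category", "searchAlias", "modelOrigin", "avatar",
   "representSnapUrl", "representThumbTileUrl", "representRes",
   "otherAvatars", "spelling", "auditState", "auditMessage", "deleted",
   "ctime", "utime"]

-- ===== PORT A =====
-- record.keys() of an association-list dict contributes its key column (duplicates collapse in the set);
-- key_set.remove(field) is guarded by 'field in key_set', so PySem.Set.discard is exact here.
def collect_fieldnames (records : List (List (String × String))) : List String :=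
  let key_set : PySem.Set String :=
    records.foldl (fun s record => PySem.Set.update s (record.map Prod.fst)) PySem.Set.empty
  let st := PREFERRED_FIELD_ORDER.foldl
    (fun (p : List String × PySem.Set String) field =>
      if PySem.Set.contains p.2 field then (p.1 ++ [field], PySem.Set.discard p.2 field) else p)
    (([] : List String), key_set)
  st.1 ++ PySem.List.sorted st.2 (fun x => x) false

-- ===== PORT B =====
-- index = {field: i for i, field in enumerate(PREFERRED_FIELD_ORDER)}
def pvIndex : PySem.Dict String Int :=
  (PySem.List.enumerate PREFERRED_FIELD_ORDER).foldl
    (fun d p => d.insert p.2 p.1) (PySem.Dict.mk [])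

-- index[k] is looked up only for keys of the preferred bucket, where it is present; getD is exact there.
def collect_fieldnames_alt (records : List (List (String × String))) : List String :=
  let keys : PySem.Set String :=
    records.foldl (fun s record => PySem.Set.update s (record.map Prod.fst)) PySem.Set.empty
  let pr := keys.foldl
    (fun (p : List String × List String) key =>
      if pvIndex.contains key then (p.1 ++ [key], p.2) else (p.1, p.2 ++ [key]))
    (([] : List String), ([] : List String))
  PySem.List.sorted pr.1 (fun k => pvIndex.getD k 0) false ++
    PySem.List.sorted pr.2 (fun x => x) false

-- ===== PRECONDITION & SPEC =====
def Spec_collect_fieldnames (records : List (List (String × String))) (out : List String) : Prop := out = collect_fieldnames_alt records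
instance (records : List (List (String × String))) (out : List String) : Decidable (Spec_collect_fieldnames records out) := by unfold Spec_collect_fieldnames; infer_instance

-- ===== CLAIM (what is proved, stated in full; the proofs are below) =====
def Claim_equal_collect_fieldnames : Prop := ∀ (records : List (List (String × String))), Dom_collect_fieldnames records → Spec_collect_fieldnames records (collect_fieldnames records)

-- ===== LEMMAS AND PROOFS =====

set_option maxRecDepth 20000 in
theorem pvP_nodup : PREFERRED_FIELD_ORDER.Nodup := by decide

set_option maxRecDepth 200000 in
theorem pvP_pairwise :
    PREFERRED_FIELD_ORDER.Pairwise (fun a b => pvIndex.getD a 0 < pvIndex.getD b 0) := by decide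

theorem pvIndex_contains (k : String) :
    pvIndex.contains k = decide (k ∈ PREFERRED_FIELD_ORDER) := by
  rw [Bool.eq_iff_iff, PySem.Dict.contains_iff_mem_keys]
  have hkeys : pvIndex.keys = PREFERRED_FIELD_ORDER := by
    unfold pvIndex
    rw [PySem.Dict.keys_foldl_insert_key]
    simp only [PySem.List.map_snd_enumerate]
    exact PySem.Set.ofList_eq_self_of_nodup _ pvP_nodup
  rw [hkeys]; simp

theorem pv_keyset_nodup (records : List (List (String × String))) (s : PySem.Set String)
    (hs : s.Nodup) :
    (records.foldl (fun s record => PySem.Set.update s (record.map Prod.fst)) s).Nodup := by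
  induction records generalizing s with
  | nil => exact hs
  | cons r rs ih => exact ih _ (PySem.Set.nodup_update _ _ hs)

theorem pv_contains_discard {s : PySem.Set String} {x p : String} (h : x ≠ p) :
    PySem.Set.contains (PySem.Set.discard s p) x = PySem.Set.contains s x := by
  rw [Bool.eq_iff_iff, PySem.Set.contains_iff, PySem.Set.contains_iff]
  simp [PySem.Set.discard, List.mem_filter, h]

theorem pv_aloop (P : List String) (hP : P.Nodup) (acc : List String) (s : PySem.Set String) :
    P.foldl
      (fun (p : List String × PySem.Set String) field =>
        if PySem.Set.contains p.2 field then (p.1 ++ [field], PySem.Set.discard p.2 field) else p)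
      (acc, s)
    = (acc ++ P.filter (fun x => PySem.Set.contains s x),
       s.filter (fun x => decide (x ∉ P))) := by
  induction P generalizing acc s with
  | nil => simp
  | cons p ps ih =>
    have hps : ps.Nodup := hP.of_cons
    have hpm : p ∉ ps := (List.nodup_cons.mp hP).1
    by_cases h : PySem.Set.contains s p = true
    · rw [List.foldl_cons, if_pos h, ih hps]
      simp only [Prod.mk.injEq]
      refine ⟨?_, ?_⟩
      · rw [List.filter_cons_of_pos h]
        have hcg : ∀ x ∈ ps, PySem.Set.contains (PySem.Set.discard s p) x = PySem.Set.contains s x :=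
          fun x hx => pv_contains_discard (fun he => hpm (he ▸ hx))
        rw [List.filter_congr hcg]
        simp
      · show List.filter _ (List.filter (fun y => !(y == p)) s) = _
        rw [List.filter_filter]
        apply List.filter_congr
        intro x _
        simp [not_or, Bool.and_comm, Bool.beq_eq_decide_eq]
    · rw [List.foldl_cons, if_neg h, ih hps]
      have hpns : p ∉ s := fun hm => h ((PySem.Set.contains_iff s p).mpr hm)
      simp only [Prod.mk.injEq]
      refine ⟨?_, ?_⟩
      · rw [List.filter_cons_of_neg h]
      · apply List.filter_congr
        intro x hx
        have hxp : x ≠ p := fun he => hpns (he ▸ hx)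
        simp [hxp]

theorem pv_bloop (ks pr oth : List String) :
    ks.foldl
      (fun (p : List String × List String) key =>
        if pvIndex.contains key then (p.1 ++ [key], p.2) else (p.1, p.2 ++ [key]))
      (pr, oth)
    = (pr ++ ks.filter (fun k => pvIndex.contains k),
       oth ++ ks.filter (fun k => !pvIndex.contains k)) := by
  induction ks generalizing pr oth with
  | nil => simp
  | cons k ks ih =>
    by_cases h : pvIndex.contains k = true
    · simp [h, ih]
    · simp only [Bool.not_eq_true] at h
      simp [h, ih]

-- ===== VERDICT (by name: the statement is the Claim_ definition above) =====
theorem collect_fieldnames_spec : Claim_equal_collect_fieldnames := by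
  intro records _
  unfold Spec_collect_fieldnames collect_fieldnames collect_fieldnames_alt
  simp only []
  set K : PySem.Set String :=
    records.foldl (fun s record => PySem.Set.update s (record.map Prod.fst)) PySem.Set.empty
    with hKdef
  have hK : K.Nodup := pv_keyset_nodup records _ List.nodup_nil
  rw [pv_aloop PREFERRED_FIELD_ORDER pvP_nodup [] K, pv_bloop K [] []]
  simp only [List.nil_append]
  congr 1
  · -- preferred bucket, sorted by index = preferred-order filter
    symm
    apply PySem.List.sorted_eq_of_perm_of_pairwise_lt
    · apply (List.perm_ext_iff_of_nodup (pvP_nodup.filter _) (hK.filter _)).mpr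
      intro a
      simp only [List.mem_filter, pvIndex_contains, PySem.Set.contains_iff, decide_eq_true_eq]
      exact and_comm
    · exact pvP_pairwise.filter _
  · -- leftover bucket: the two filters are pointwise equal
    congr 1
    apply List.filter_congr
    intro x _
    simp [pvIndex_contains]
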